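-- pv_equiv track=rewrite | github.com/colmmurphyxyz/competitive-programming | leetcode/2558_Take_Gifts_From_the_Richest_Pile.py | pickGifts
-- ===== SOURCE A (Python) =====
-- import heapq
-- from math import sqrt
--
-- def pickGifts(gifts: list[int], k: int) -> int:
--     total_gifts = 0
--     for i, g in enumerate(gifts):
--         total_gifts += g
--         gifts[i] = -g
--     heapq.heapify(gifts)
--     for _ in range(k):
--         top = -heapq.heappop(gifts)
--         updated = int(sqrt(top))
--         total_gifts -= (top - updated)
--         heapq.heappush(gifts, -updated)
--     return total_gifts
-- ===== SOURCE B (Python) =====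
-- from math import sqrt
--
-- def pickGifts(gifts: list[int], k: int) -> int:
--     # No heap: each round, find the max by a plain scan and replace it in place
--     # in a copy of the list; sum at the end.  (Does not mutate the argument.)
--     vals = list(gifts)
--     for _ in range(k):
--         m = max(vals)
--         vals[vals.index(m)] = int(sqrt(m))
--     return sum(vals)
-- ===== Notes on version B (the rewrite author's own statement) =====
-- stated objective: simpler
-- what changed: Drops heapq entirely: each round scans a plain list for the maximum and replaces it in place, then sums once at the end (and B does not mutate the caller's list, whereas A turns it into a negated heap).
import Mathlib
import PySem

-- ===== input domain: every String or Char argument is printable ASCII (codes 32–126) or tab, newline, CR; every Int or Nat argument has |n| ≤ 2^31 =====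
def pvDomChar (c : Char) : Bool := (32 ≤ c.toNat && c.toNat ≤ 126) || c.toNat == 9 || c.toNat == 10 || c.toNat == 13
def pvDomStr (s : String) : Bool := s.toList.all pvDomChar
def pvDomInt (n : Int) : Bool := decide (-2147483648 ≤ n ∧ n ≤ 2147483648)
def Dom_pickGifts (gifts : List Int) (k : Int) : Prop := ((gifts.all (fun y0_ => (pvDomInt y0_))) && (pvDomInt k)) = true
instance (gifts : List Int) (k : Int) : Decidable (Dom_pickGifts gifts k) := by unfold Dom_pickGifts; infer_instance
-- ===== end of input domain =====

-- B drops heapq: per round a plain scan finds the max, replaced in place; sum once at the end.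
-- Objective: simpler.  Equivalence is about the RETURN value only: A mutates `gifts` into a
-- negated heap, B does not mutate the argument.


-- ===== PORT A =====
-- int(sqrt(x)) of Python: for 0 ≤ x ≤ 2^31 the correctly-rounded double sqrt truncates to
-- exactly Nat.sqrt x (isqrt); for x < 0 Python raises ValueError (excluded by Pre_), the
-- port returns 0 there.  Used by both ports (both Pythons compute int(sqrt(...))).
def pvIntSqrt (x : Int) : Int := if x < 0 then 0 else (Nat.sqrt x.toNat : Int)

-- the k rounds of A: heap holds the negated values; heappop is modeled as removing the
-- first minimal element (the heap layout only permutes the list; the popped VALUE and the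
-- returned total are the same); heappush appends.  none = heappop on an empty heap: Python
-- raises IndexError there (excluded by Pre_).
def pickGiftsLoopA : Nat → Int → List Int → Int × List Int
  | 0, total, heap => (total, heap)
  | n+1, total, heap =>
    match PySem.List.min? heap (fun y => y) with
    | none => (total, heap)
    | some m =>
      let top := -m
      let updated := pvIntSqrt top
      pickGiftsLoopA n (total - (top - updated)) (heap.erase m ++ [-updated])

def pickGifts (gifts : List Int) (k : Int) : Int :=
  -- first loop: total_gifts += g; gifts[i] = -g
  let init := gifts.foldl (fun (st : Int × List Int) g => (st.1 + g, st.2 ++ [-g])) (0, [])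
  -- heapq.heapify rearranges in place (a permutation; multiset-level no-op), then k rounds
  (pickGiftsLoopA k.toNat init.1 init.2).1

-- ===== PORT B =====
-- k rounds on a copy of the list: m = max(vals); vals[vals.index(m)] = int(sqrt(m)).
-- The none branch is max([]) raising ValueError in Python (excluded by Pre_); index? of a
-- member of the list never returns none.
def pickGiftsLoopB : Nat → List Int → List Int
  | 0, vals => vals
  | n+1, vals =>
    match PySem.List.max? vals (fun y => y) with
    | none => vals
    | some m =>
      match PySem.List.index? vals m with
      | none => vals
      | some i => pickGiftsLoopB n (vals.set i (pvIntSqrt m))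

def pickGifts_alt (gifts : List Int) (k : Int) : Int :=
  (pickGiftsLoopB k.toNat gifts).sum

-- ===== PRECONDITION & SPEC =====
-- Pre_ excludes exactly the inputs where Python A raises (B raises on the same inputs):
-- k > 0 with an empty list (heappop IndexError) or with all elements negative
-- (math.sqrt of a negative raises ValueError).
def Pre_pickGifts (gifts : List Int) (k : Int) : Prop :=
  k ≤ 0 ∨ ∃ g ∈ gifts, 0 ≤ g
instance (gifts : List Int) (k : Int) : Decidable (Pre_pickGifts gifts k) := by
  unfold Pre_pickGifts; infer_instance

def pvWitness_pickGifts : List Int × Int := ([25, 64, 9, 3], 4)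

def Spec_pickGifts (gifts : List Int) (k : Int) (out : Int) : Prop := out = pickGifts_alt gifts k
instance (gifts : List Int) (k : Int) (out : Int) : Decidable (Spec_pickGifts gifts k out) := by unfold Spec_pickGifts; infer_instance

-- ===== CLAIM (what is proved, stated in full; the proofs are below) =====
def Claim_equal_pickGifts : Prop := ∀ (gifts : List Int) (k : Int), Dom_pickGifts gifts k → Pre_pickGifts gifts k → Spec_pickGifts gifts k (pickGifts gifts k)

-- ===== LEMMAS AND PROOFS =====

-- setting at the split point
lemma pv_set_decomp (pre : List Int) (M u : Int) (suf : List Int) :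
    (pre ++ M :: suf).set pre.length u = pre ++ u :: suf := by
  induction pre with
  | nil => simp
  | cons a t ih => simp [ih]

-- erasing the first occurrence at the split point
lemma pv_erase_decomp (pre : List Int) (m : Int) (suf : List Int) (h : m ∉ pre) :
    (pre ++ m :: suf).erase m = pre ++ suf := by
  rw [List.erase_append_right _ (by simpa using h), List.erase_cons_head]

-- A's first loop computes the sum and the negated list
lemma pv_initLoop (l : List Int) (t : Int) (acc : List Int) :
    l.foldl (fun (st : Int × List Int) g => (st.1 + g, st.2 ++ [-g])) (t, acc)
      = (t + l.sum, acc ++ l.map (fun g => -g)) := by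
  induction l generalizing t acc with
  | nil => simp
  | cons a l ih => simp [ih]; ring

-- the invariant: A's running total is the sum of B's list and A's heap is a permutation
-- of B's list negated; then the two loops return the same total.
lemma pv_loop_rel (n : Nat) :
    ∀ (total : Int) (heap vals : List Int),
      total = vals.sum → heap.Perm (vals.map (fun v => -v)) →
      (pickGiftsLoopA n total heap).1 = (pickGiftsLoopB n vals).sum := by
  induction n with
  | zero => intro total heap vals ht _; simpa [pickGiftsLoopA, pickGiftsLoopB] using ht
  | succ n ih =>
    intro total heap vals ht hperm
    rcases hmin : PySem.List.min? heap (fun y => y) with _ | m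
    · -- heap empty ⇒ vals empty ⇒ both loops stop
      have hheap : heap = [] := (PySem.List.min?_eq_none_iff _ _).1 hmin
      subst hheap
      have hv : vals = [] := by
        cases vals with
        | nil => rfl
        | cons a t => exact absurd hperm.symm (by simp)
      subst hv
      have hmax : PySem.List.max? ([] : List Int) (fun y => y) = none :=
        (PySem.List.max?_eq_none_iff _ _).2 rfl
      simpa [pickGiftsLoopA, pickGiftsLoopB, hmin, hmax] using ht
    · -- m is the min of the negated list, so -m is the max of vals
      have hmem : m ∈ heap := PySem.List.min?_mem hmin
      have hlb : ∀ y ∈ heap, m ≤ y := fun y hy => PySem.List.min?_isMin hmin y hy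
      have hmemv : -m ∈ vals := by
        rcases List.mem_map.1 (hperm.mem_iff.1 hmem) with ⟨v, hv, hveq⟩
        have : v = -m := by omega
        simpa [this] using hv
      have hub : ∀ y ∈ vals, y ≤ -m := by
        intro y hy
        have := hlb (-y) (hperm.mem_iff.2 (List.mem_map.2 ⟨y, hy, rfl⟩))
        omega
      rcases hmax : PySem.List.max? vals (fun y => y) with _ | M
      · exact absurd ((PySem.List.max?_eq_none_iff _ _).1 hmax) (by rintro rfl; simp at hmemv)
      have hMeq : M = -m :=
        le_antisymm (hub _ (PySem.List.max?_mem hmax)) (PySem.List.max?_isMax hmax _ hmemv)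
      subst hMeq
      have hMsome : (PySem.List.index? vals (-m)).isSome :=
        (PySem.List.index?_isSome_iff _ _).2 hmemv
      rcases hidx : PySem.List.index? vals (-m) with _ | i
      · rw [hidx] at hMsome; simp at hMsome
      rcases (PySem.List.index?_eq_some_iff _ _ _).1 hidx with ⟨pre, suf, hsplit, hlen, hpre⟩
      subst hsplit
      subst hlen
      simp only [pickGiftsLoopA, pickGiftsLoopB, hmin, hmax, hidx]
      rw [pv_set_decomp]
      apply ih
      · -- the sums agree
        simp only [ht, List.sum_append, List.sum_cons]
        ring
      · -- the permutation is preserved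
        have hmne : m ∉ pre.map (fun v => -v) := by
          intro hm
          rcases List.mem_map.1 hm with ⟨v, hv, hveq⟩
          have : v = -m := by omega
          exact hpre (this ▸ hv)
        have hsplit' : (pre ++ -m :: suf).map (fun v => -v)
            = pre.map (fun v => -v) ++ m :: suf.map (fun v => -v) := by simp
        have h1 : (heap.erase m).Perm (pre.map (fun v => -v) ++ suf.map (fun v => -v)) := by
          have := hperm.erase m
          rwa [hsplit', pv_erase_decomp _ _ _ hmne] at this
        have h2 : ((pre.map (fun v => -v) ++ suf.map (fun v => -v))
              ++ [-pvIntSqrt (-m)]).Perm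
            ((pre ++ pvIntSqrt (-m) :: suf).map (fun v => -v)) := by
          simp only [List.map_append, List.map_cons, List.append_assoc]
          exact List.Perm.append_left _ (List.perm_append_singleton _ _)
        exact (h1.append_right _).trans h2

-- ===== VERDICT (by name: the statement is the Claim_ definition above) =====
theorem pickGifts_spec : Claim_equal_pickGifts := by
  intro gifts k _ _
  unfold Spec_pickGifts pickGifts pickGifts_alt
  rw [show ((0 : Int), ([] : List Int)) = ((0 : Int), ([] : List Int)) from rfl, pv_initLoop]
  exact pv_loop_rel k.toNat _ _ _ (by simp) (by simp)
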